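-- pv_equiv track=rewrite | github.com/databrickslabs/lakeflow-community-connectors | src/databricks/labs/community_connector/sources/terna/modules/load/monthly_index_industrial_electrical_consumption_reader.py | _month_range
-- ===== SOURCE A (Python) =====
-- def _month_range(
--     year_from: int, month_from: int, year_to: int, month_to: int
-- ) -> list[tuple[int, int]]:
--     """Generate a list of (year, month) tuples from start to end (inclusive)."""
--     months: list[tuple[int, int]] = []
--     y, m = year_from, month_from
--     while (y, m) <= (year_to, month_to):
--         months.append((y, m))
--         if m == 12:
--             y += 1
--             m = 1
--         else:
--             m += 1
--     return months
-- ===== SOURCE B (Python) =====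
-- def _month_range(
--     year_from: int, month_from: int, year_to: int, month_to: int
-- ) -> list[tuple[int, int]]:
--     """Generate a list of (year, month) tuples from start to end (inclusive)."""
--     months: list[tuple[int, int]] = []
--     for y in range(year_from, year_to + 1):
--         first = month_from if y == year_from else 1
--         last = month_to if y == year_to else 12
--         for m in range(first, last + 1):
--             months.append((y, m))
--     return months
-- ===== Notes on version B (the rewrite author's own statement) =====
-- stated objective: idiomatic
-- what changed: The carry-based while loop with its explicit month-rollover branch is replaced by two nested bounded for-loops: the outer iterates the years, the inner iterates each year's month range (clipped at the start and end year), so no mutable (y, m) carry state remains.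
import Mathlib
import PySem

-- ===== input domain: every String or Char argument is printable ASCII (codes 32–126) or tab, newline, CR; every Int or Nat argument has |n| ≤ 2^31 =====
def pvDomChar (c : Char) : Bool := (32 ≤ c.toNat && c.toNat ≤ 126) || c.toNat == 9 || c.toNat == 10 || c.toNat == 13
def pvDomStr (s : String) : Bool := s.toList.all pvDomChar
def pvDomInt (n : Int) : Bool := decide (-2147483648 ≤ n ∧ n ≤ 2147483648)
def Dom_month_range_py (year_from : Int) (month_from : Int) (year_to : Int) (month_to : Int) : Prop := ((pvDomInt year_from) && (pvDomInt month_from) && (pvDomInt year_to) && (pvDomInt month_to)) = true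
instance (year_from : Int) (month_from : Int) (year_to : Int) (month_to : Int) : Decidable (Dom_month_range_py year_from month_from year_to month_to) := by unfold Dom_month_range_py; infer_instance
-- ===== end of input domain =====

-- B replaces A's carry-based while loop (mutable (y, m) with a rollover branch) by two nested
-- bounded for-loops over ranges; same O(n) cost, no speed claim; return value only, no mutation.

-- ===== PORT A =====
-- A's 'while (y, m) <= (year_to, month_to)' loop can run forever (month_from > 12 with
-- year_from < year_to never hits the rollover), so the port drives it with an explicit fuel
-- that is provably sufficient on every input where the Python loop terminates inside Pre_;
-- the loop body is a step-for-step transliteration (lexicographic guard, rollover branch, append).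
def mrLoop (year_to month_to : Int) (fuel : Nat) (y m : Int) (months : List (Int × Int)) : List (Int × Int) :=
  match fuel with
  | 0 => months
  | fuel + 1 =>
    if y < year_to ∨ (y = year_to ∧ m ≤ month_to) then
      if m = 12 then mrLoop year_to month_to fuel (y + 1) 1 (months ++ [(y, m)])
      else mrLoop year_to month_to fuel y (m + 1) (months ++ [(y, m)])
    else months

def mrFuel (year_from month_from year_to month_to : Int) : Nat :=
  (12 * (year_to - year_from)).toNat + (12 - month_from).toNat + (month_to - month_from).toNat + 2

def month_range_py (year_from : Int) (month_from : Int) (year_to : Int) (month_to : Int) : List (Int × Int) :=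
  mrLoop year_to month_to (mrFuel year_from month_from year_to month_to) year_from month_from []

-- ===== PORT B =====
def month_range_py_alt (year_from : Int) (month_from : Int) (year_to : Int) (month_to : Int) : List (Int × Int) :=
  (PySem.List.pyRange year_from (year_to + 1) 1).foldl
    (fun months y =>
      let first : Int := if y = year_from then month_from else 1
      let last : Int := if y = year_to then month_to else 12
      months ++ (PySem.List.pyRange first (last + 1) 1).map (fun m => (y, m)))
    []

-- ===== PRECONDITION & SPEC =====
-- Pre_ excludes (a) the inputs where A's loop never terminates (month_from > 12 with
-- year_from < year_to on a lexicographically non-empty range), and (b) the non-calendar corner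
-- month_to > 12 reached with a normalized start (month_from ≤ 12 on a non-empty range), where
-- A stops at month 12 while B runs on to month_to — for an out-of-range month_to both values
-- are defensible and neither would be specified.
def Pre_month_range_py (year_from : Int) (month_from : Int) (year_to : Int) (month_to : Int) : Prop :=
  (year_to < year_from ∨ (year_from = year_to ∧ month_to < month_from)) ∨
  (month_from ≤ 12 ∧ month_to ≤ 12) ∨
  (year_from = year_to ∧ 12 < month_from)
instance (year_from : Int) (month_from : Int) (year_to : Int) (month_to : Int) : Decidable (Pre_month_range_py year_from month_from year_to month_to) := by unfold Pre_month_range_py; infer_instance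

def pvWitness_month_range_py : Int × Int × Int × Int := (2023, 11, 2024, 2)

def Spec_month_range_py (year_from : Int) (month_from : Int) (year_to : Int) (month_to : Int) (out : List (Int × Int)) : Prop := out = month_range_py_alt year_from month_from year_to month_to
instance (year_from : Int) (month_from : Int) (year_to : Int) (month_to : Int) (out : List (Int × Int)) : Decidable (Spec_month_range_py year_from month_from year_to month_to out) := by unfold Spec_month_range_py; infer_instance

-- ===== CLAIM (what is proved, stated in full; the proofs are below) =====
def Claim_equal_month_range_py : Prop := ∀ (year_from : Int) (month_from : Int) (year_to : Int) (month_to : Int), Dom_month_range_py year_from month_from year_to month_to → Pre_month_range_py year_from month_from year_to month_to → Spec_month_range_py year_from month_from year_to month_to (month_range_py year_from month_from year_to month_to)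

-- ===== LEMMAS AND PROOFS =====

-- A's loop without the accumulator.
def mrSeq (year_to month_to : Int) : Nat → Int → Int → List (Int × Int)
  | 0, _, _ => []
  | fuel + 1, y, m =>
    if y < year_to ∨ (y = year_to ∧ m ≤ month_to) then
      (y, m) :: (if m = 12 then mrSeq year_to month_to fuel (y + 1) 1
                 else mrSeq year_to month_to fuel y (m + 1))
    else []

theorem mrLoop_eq_seq (yt mt : Int) (fuel : Nat) :
    ∀ (y m : Int) (acc : List (Int × Int)),
      mrLoop yt mt fuel y m acc = acc ++ mrSeq yt mt fuel y m := by
  induction fuel with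
  | zero => intro y m acc; simp [mrLoop, mrSeq]
  | succ f ih =>
    intro y m acc
    simp only [mrLoop, mrSeq]
    split
    · split
      · rw [ih]; simp
      · rw [ih]; simp
    · simp

-- B's result as a flatMap over the year range.
theorem alt_eq_flatMap (yf mf yt mt : Int) :
    month_range_py_alt yf mf yt mt =
      (PySem.List.pyRange yf (yt + 1) 1).flatMap
        (fun y => (PySem.List.pyRange (if y = yf then mf else 1) ((if y = yt then mt else 12) + 1) 1).map
          (fun m => (y, m))) := by
  unfold month_range_py_alt
  rw [PySem.List.foldl_append_eq_flatMap]
  simp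

-- empty cases for B
theorem alt_empty (yf mf yt mt : Int)
    (h : yt < yf ∨ (yf = yt ∧ mt < mf)) : month_range_py_alt yf mf yt mt = [] := by
  rw [alt_eq_flatMap]
  rcases h with h | ⟨rfl, h⟩
  · rw [PySem.List.pyRange_one_eq_nil (by omega)]; simp
  · rw [PySem.List.pyRange_one_singleton]
    simp [PySem.List.pyRange_one_eq_nil (show mt + 1 ≤ mf by omega)]

-- step lemma: same-year advance (m below the year's last month)
theorem alt_step_m (yf mf yt mt : Int) (hy : yf ≤ yt) (hm : mf ≤ (if yf = yt then mt else 12)) :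
    month_range_py_alt yf mf yt mt = (yf, mf) :: month_range_py_alt yf (mf + 1) yt mt := by
  rw [alt_eq_flatMap, alt_eq_flatMap]
  rw [PySem.List.pyRange_one_cons (show yf < yt + 1 by omega)]
  simp only [List.flatMap_cons, reduceIte]
  have htail :
      (PySem.List.pyRange (yf + 1) (yt + 1) 1).flatMap
          (fun y => (PySem.List.pyRange (if y = yf then mf else 1) ((if y = yt then mt else 12) + 1) 1).map
            (fun m => (y, m)))
        = (PySem.List.pyRange (yf + 1) (yt + 1) 1).flatMap
          (fun y => (PySem.List.pyRange (if y = yf then mf + 1 else 1) ((if y = yt then mt else 12) + 1) 1).map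
            (fun m => (y, m))) := by
    refine List.flatMap_congr (fun x hx => ?_)
    have hne : x ≠ yf := by
      have hx1 := (PySem.List.mem_pyRange_one.mp hx).1
      omega
    simp only [if_neg hne]
  rw [htail]
  rw [PySem.List.pyRange_one_cons (show mf < (if yf = yt then mt else 12) + 1 by
        split <;> omega)]
  simp

-- step lemma: rollover at December, yf < yt
theorem alt_step_roll (yf yt mt : Int) (hy : yf < yt) :
    month_range_py_alt yf 12 yt mt = (yf, 12) :: month_range_py_alt (yf + 1) 1 yt mt := by
  rw [alt_eq_flatMap, alt_eq_flatMap]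
  rw [PySem.List.pyRange_one_cons (show yf < yt + 1 by omega)]
  simp only [List.flatMap_cons, reduceIte]
  rw [show (if yf = yt then mt else (12:Int)) = 12 from if_neg (by omega)]
  have htail :
      (PySem.List.pyRange (yf + 1) (yt + 1) 1).flatMap
          (fun y => (PySem.List.pyRange (if y = yf then (12:Int) else 1) ((if y = yt then mt else 12) + 1) 1).map
            (fun m => (y, m)))
        = (PySem.List.pyRange (yf + 1) (yt + 1) 1).flatMap
          (fun y => (PySem.List.pyRange (if y = yf + 1 then (1:Int) else 1) ((if y = yt then mt else 12) + 1) 1).map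
            (fun m => (y, m))) := by
    refine List.flatMap_congr (fun x hx => ?_)
    have hne : x ≠ yf := by
      have hx1 := (PySem.List.mem_pyRange_one.mp hx).1
      omega
    simp only [if_neg hne, ite_self]
  rw [htail]
  rw [show (12:Int) + 1 = 13 from rfl, show PySem.List.pyRange 12 13 1 = [12] from PySem.List.pyRange_one_singleton 12]
  simp

theorem alt_single_year (yt m mt : Int) :
    month_range_py_alt yt m yt mt = (PySem.List.pyRange m (mt + 1) 1).map (fun m' => (yt, m')) := by
  rw [alt_eq_flatMap]
  rw [PySem.List.pyRange_one_singleton]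
  simp

-- main loop lemma for a normalized start month (mf ≤ 12) with mt ≤ 12
theorem seq_eq_alt (yt mt : Int) (hmt : mt ≤ 12) :
    ∀ (fuel : Nat) (y m : Int), m ≤ 12 →
      (12 * (yt - y) + (13 - m)).toNat < fuel →
      mrSeq yt mt fuel y m = month_range_py_alt y m yt mt := by
  intro fuel
  induction fuel with
  | zero => intro y m _ h; omega
  | succ f ih =>
    intro y m hm hf
    simp only [mrSeq]
    split
    · rename_i hg
      split
      · rename_i h12
        subst h12
        rw [ih (y + 1) 1 (by omega) (by omega)]
        rcases lt_or_eq_of_le (show y ≤ yt by rcases hg with h | ⟨rfl, h⟩ <;> omega) with hy | rfl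
        · rw [alt_step_roll _ _ _ hy]
        · have hmt12 : mt = 12 := by rcases hg with h | ⟨_, h⟩ <;> omega
          subst hmt12
          rw [alt_empty (y + 1) 1 y 12 (by omega)]
          rw [alt_single_year]
          rw [show (12:Int) + 1 = 13 from rfl, show PySem.List.pyRange 12 13 1 = [12] from PySem.List.pyRange_one_singleton 12]
          simp
      · rename_i h12
        rw [ih y (m + 1) (by omega) (by omega)]
        rw [← alt_step_m y m yt mt (by rcases hg with h | ⟨rfl, h⟩ <;> omega)
              (by split
                  · rename_i hyt; rcases hg with h | ⟨_, h⟩ <;> omega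
                  · omega)]
    · rename_i hg
      rw [alt_empty y m yt mt (by omega)]

-- flat run for an un-normalized start month (mf > 12, single year)
theorem seq_flat (yt mt : Int) :
    ∀ (fuel : Nat) (m : Int), 12 < m → (mt + 1 - m).toNat < fuel →
      mrSeq yt mt fuel yt m = (PySem.List.pyRange m (mt + 1) 1).map (fun m' => (yt, m')) := by
  intro fuel
  induction fuel with
  | zero => intro m _ h; omega
  | succ f ih =>
    intro m hm hf
    simp only [mrSeq]
    split
    · rename_i hg
      have hmt : m ≤ mt := by rcases hg with h | ⟨_, h⟩ <;> omega
      rw [if_neg (by omega)]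
      rw [ih (m + 1) (by omega) (by omega)]
      rw [show PySem.List.pyRange m (mt + 1) 1 = m :: PySem.List.pyRange (m + 1) (mt + 1) 1 from
            PySem.List.pyRange_one_cons (by omega)]
      simp
    · rename_i hg
      have hgt : mt < m := by
        by_contra h
        exact hg (Or.inr ⟨trivial, by omega⟩)
      rw [show PySem.List.pyRange m (mt + 1) 1 = [] from PySem.List.pyRange_one_eq_nil (by omega)]
      simp

-- ===== VERDICT (by name: the statement is the Claim_ definition above) =====
theorem month_range_py_spec : Claim_equal_month_range_py := by
  intro yf mf yt mt _ hpre
  unfold Spec_month_range_py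
  unfold month_range_py
  rw [mrLoop_eq_seq, List.nil_append]
  rcases hpre with h | ⟨hmf, hmt⟩ | ⟨rfl, hmf⟩
  · -- empty range: guard false immediately
    rw [alt_empty _ _ _ _ (by omega)]
    unfold mrFuel
    cases h' : (12 * (yt - yf)).toNat + (12 - mf).toNat + (mt - mf).toNat + 2 with
    | zero => simp [mrSeq]
    | succ n => simp only [mrSeq]; rw [if_neg (by omega)]
  · -- normalized months
    exact seq_eq_alt yt mt hmt _ yf mf hmf (by unfold mrFuel; omega)
  · -- single-year flat run with month_from > 12
    rw [alt_single_year]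
    exact seq_flat yf mt _ mf hmf (by unfold mrFuel; omega)
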